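-- pv_equiv track=rewrite | github.com/fralar-code/Compression-data-algorithms | src/BWT/bwt.py | bucket_range
-- ===== SOURCE A (Python) =====
-- def bucket_range(string):
--     # Sort characters of the string
--     sorted_string = sorted(string)
--
--     # Initialize a dictionary to store index ranges
--     range_indices = {}
--
--     # Track the current index and previous character
--     current_index = 0
--     previous_char = None
--
--     for i, char in enumerate(sorted_string):
--         if char != previous_char:
--             if previous_char is not None:
--                 range_indices[previous_char] = [current_index, i - 1, 0]
--             current_index = i
--             previous_char = char
--
--     # Add range for the last character
--     if previous_char is not None:
--         range_indices[previous_char] = [current_index, len(sorted_string) - 1, 0]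
--
--     return range_indices
-- ===== SOURCE B (Python) =====
-- def bucket_range(string):
--     # Count occurrences of each character in one pass
--     counts = {}
--     for ch in string:
--         counts[ch] = counts.get(ch, 0) + 1
--     # Sort only the distinct characters and assign cumulative index ranges
--     range_indices = {}
--     start = 0
--     for ch in sorted(counts):
--         n = counts[ch]
--         range_indices[ch] = [start, start + n - 1, 0]
--         start += n
--     return range_indices
-- ===== Notes on version B (the rewrite author's own statement) =====
-- stated objective: alternative
-- what changed: Instead of sorting the whole string and scanning adjacent elements for group boundaries, B counts characters in one pass, sorts only the distinct characters, and derives each range by a cumulative prefix sum of the counts.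
import Mathlib
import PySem

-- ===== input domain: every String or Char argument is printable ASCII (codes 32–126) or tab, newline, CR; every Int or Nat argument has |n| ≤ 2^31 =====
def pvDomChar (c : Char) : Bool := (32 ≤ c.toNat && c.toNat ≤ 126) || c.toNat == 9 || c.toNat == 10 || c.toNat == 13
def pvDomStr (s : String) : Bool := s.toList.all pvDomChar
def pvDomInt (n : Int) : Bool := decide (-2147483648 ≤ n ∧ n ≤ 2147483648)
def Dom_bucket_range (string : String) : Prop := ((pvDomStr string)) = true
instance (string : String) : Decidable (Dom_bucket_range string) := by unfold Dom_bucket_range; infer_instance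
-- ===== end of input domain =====

-- B replaces the full sort + adjacent-boundary scan by a one-pass count, a sort of the
-- distinct characters only, and cumulative prefix ranges (alternative algorithm, same result).

-- ===== PORT A =====
-- loop body of A's 'for i, char in enumerate(sorted_string)'
def pvStepA (st : PySem.Dict String (List Int) × Int × Option Char) (ic : Int × Char) :
    PySem.Dict String (List Int) × Int × Option Char :=
  if st.2.2 ≠ some ic.2 then
    ((match st.2.2 with
      | some p => st.1.insert (String.singleton p) [st.2.1, ic.1 - 1, 0]
      | none => st.1), ic.1, some ic.2)
  else st

def bucket_range (string : String) : List (String × List Int) :=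
  let sorted_string := PySem.List.sorted string.toList (fun x => x) false
  let st := (PySem.List.enumerate sorted_string 0).foldl pvStepA (PySem.Dict.empty, 0, none)
  match st.2.2 with
  | some p => (st.1.insert (String.singleton p) [st.2.1, (sorted_string.length : Int) - 1, 0]).items
  | none => st.1.items

-- ===== PORT B =====
-- loop body of B's 'for ch in sorted(counts)'
def pvStepB (counts : PySem.Dict Char Int)
    (st : PySem.Dict String (List Int) × Int) (c : Char) :
    PySem.Dict String (List Int) × Int :=
  let n := counts.getD c 0
  (st.1.insert (String.singleton c) [st.2, st.2 + n - 1, 0], st.2 + n)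

-- B's 'counts' dictionary: one counting pass over the string
def pvCounts (l : List Char) : PySem.Dict Char Int :=
  l.foldl (fun d c => d.insert c (d.getD c 0 + 1)) PySem.Dict.empty

def bucket_range_alt (string : String) : List (String × List Int) :=
  ((PySem.List.sorted (pvCounts string.toList).keys (fun x => x) false).foldl
    (pvStepB (pvCounts string.toList)) (PySem.Dict.empty, 0)).1.items

-- ===== PRECONDITION & SPEC =====
def Spec_bucket_range (string : String) (out : List (String × List Int)) : Prop := out = bucket_range_alt string
instance (string : String) (out : List (String × List Int)) : Decidable (Spec_bucket_range string out) := by unfold Spec_bucket_range; infer_instance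

-- ===== CLAIM (what is proved, stated in full; the proofs are below) =====
def Claim_equal_bucket_range : Prop := ∀ (string : String), Dom_bucket_range string → Spec_bucket_range string (bucket_range string)

-- ===== LEMMAS AND PROOFS =====

-- sorted string as concatenation of groups of equal characters
def pvExpand (n : Char → Nat) : List Char → List Char
  | [] => []
  | c :: u => List.replicate (n c) c ++ pvExpand n u

-- common shape of both remainders: pending group (key pk, start ci), then groups for u
def pvBpend (cnt : Char → Int) : List Char → String → Int →
    PySem.Dict String (List Int) → Int → Int → PySem.Dict String (List Int)
  | [], pk, ci, d, _, last => d.insert pk [ci, last, 0]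
  | c :: u, pk, ci, d, k, last =>
      pvBpend cnt u (String.singleton c) k (d.insert pk [ci, k - 1, 0]) (k + cnt c) last

def pvApplyPrev (prev : Option Char) (d : PySem.Dict String (List Int)) (ci k : Int) :
    PySem.Dict String (List Int) :=
  match prev with
  | some p => d.insert (String.singleton p) [ci, k - 1, 0]
  | none => d

def pvFinish (st : PySem.Dict String (List Int) × Int × Option Char) (last : Int) :
    PySem.Dict String (List Int) :=
  match st.2.2 with
  | some q => st.1.insert (String.singleton q) [st.2.1, last, 0]
  | none => st.1

theorem pvRunA_rep_same (c : Char) : ∀ (m : Nat) (k : Int)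
    (d : PySem.Dict String (List Int)) (ci : Int),
    (PySem.List.enumerate (List.replicate m c) k).foldl pvStepA (d, ci, some c) = (d, ci, some c) := by
  intro m
  induction m with
  | zero => intro k d ci; simp [PySem.List.enumerate_nil]
  | succ m ih =>
      intro k d ci
      rw [List.replicate_succ, PySem.List.enumerate_cons, List.foldl_cons]
      have hs : pvStepA (d, ci, some c) (k, c) = (d, ci, some c) := by simp [pvStepA]
      rw [hs, ih]

theorem pvRunA_group (c : Char) (m : Nat) (k : Int) (d : PySem.Dict String (List Int))
    (ci : Int) (prev : Option Char) (hne : prev ≠ some c) :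
    (PySem.List.enumerate (List.replicate (m + 1) c) k).foldl pvStepA (d, ci, prev)
      = (pvApplyPrev prev d ci k, k, some c) := by
  rw [List.replicate_succ, PySem.List.enumerate_cons, List.foldl_cons]
  have hs : pvStepA (d, ci, prev) (k, c) = (pvApplyPrev prev d ci k, k, some c) := by
    cases prev with
    | none => simp [pvStepA, pvApplyPrev]
    | some p => simp [pvStepA, pvApplyPrev, hne]
  rw [hs, pvRunA_rep_same]

theorem pvMain (n : Char → Nat) : ∀ (u : List Char), u.Pairwise (· < ·) →
    (∀ c ∈ u, 0 < n c) → ∀ (p : Char), (∀ c ∈ u, p ≠ c) →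
    ∀ (d : PySem.Dict String (List Int)) (ci k last : Int),
    pvFinish ((PySem.List.enumerate (pvExpand n u) k).foldl pvStepA (d, ci, some p)) last
      = pvBpend (fun c => (n c : Int)) u (String.singleton p) ci d k last := by
  intro u
  induction u with
  | nil => intro _ _ p _ d ci k last; simp [pvExpand, PySem.List.enumerate_nil, pvFinish, pvBpend]
  | cons c u ih =>
      intro hpw hpos p hp d ci k last
      obtain ⟨m, hm⟩ := Nat.exists_eq_add_of_lt (hpos c (by simp))
      have hm' : n c = m + 1 := by omega
      rw [pvExpand, PySem.List.enumerate_append, List.foldl_append, hm', pvRunA_group c m k d ci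
        (some p) (by simpa using hp c (by simp))]
      have hlen : ((List.replicate (m + 1) c).length : Int) = (n c : Int) := by
        simp [hm']
      rw [hlen, show pvApplyPrev (some p) d ci k
        = d.insert (String.singleton p) [ci, k - 1, 0] from rfl]
      rw [ih hpw.of_cons (fun x hx => hpos x (by simp [hx])) c
        (fun x hx => ne_of_lt (List.rel_of_pairwise_cons hpw hx)) _ _ _ last]
      simp [pvBpend]

theorem pvFoldB (counts : PySem.Dict Char Int) : ∀ (u : List Char) (c : Char)
    (d : PySem.Dict String (List Int)) (s : Int),
    ((c :: u).foldl (pvStepB counts) (d, s)).1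
      = pvBpend (fun x => counts.getD x 0) u (String.singleton c) s d (s + counts.getD c 0)
          (s + ((c :: u).map (fun x => counts.getD x 0)).sum - 1) := by
  intro u
  induction u with
  | nil => intro c d s; simp [pvStepB, pvBpend]
  | cons c' u ih =>
      intro c d s
      rw [List.foldl_cons]
      show ((c' :: u).foldl (pvStepB counts) (pvStepB counts (d, s) c)).1 = _
      rw [show pvStepB counts (d, s) c
          = (d.insert (String.singleton c) [s, s + counts.getD c 0 - 1, 0], s + counts.getD c 0)
          from rfl]
      rw [ih]
      simp only [pvBpend, List.map_cons, List.sum_cons]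
      congr 1
      ring

theorem pvExpand_length (n : Char → Nat) : ∀ (u : List Char),
    (pvExpand n u).length = (u.map n).sum := by
  intro u; induction u with
  | nil => simp [pvExpand]
  | cons c u ih => simp [pvExpand, ih]

theorem pvExpand_count (n : Char → Nat) (x : Char) : ∀ (u : List Char), u.Nodup →
    (pvExpand n u).count x = if x ∈ u then n x else 0 := by
  intro u; induction u with
  | nil => simp [pvExpand]
  | cons c u ih =>
      intro hnd
      rw [pvExpand, List.count_append, List.count_replicate, ih hnd.of_cons]
      by_cases hx : x = c
      · subst hx
        simp [List.Nodup.notMem hnd]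
      · simp [hx, Ne.symm hx]

theorem pvExpand_mem (n : Char → Nat) : ∀ (u : List Char) (x : Char),
    x ∈ pvExpand n u → x ∈ u := by
  intro u
  induction u with
  | nil => intro x hx; simp [pvExpand] at hx
  | cons c u ih =>
      intro x hx
      rw [pvExpand, List.mem_append] at hx
      rcases hx with hx | hx
      · simp [List.eq_of_mem_replicate hx]
      · simp [ih x hx]

theorem pvExpand_pairwise (n : Char → Nat) : ∀ (u : List Char), u.Pairwise (· < ·) →
    (pvExpand n u).Pairwise (· ≤ ·) := by
  intro u; induction u with
  | nil => intro _; simp [pvExpand]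
  | cons c u ih =>
      intro hpw
      rw [pvExpand, List.pairwise_append]
      refine ⟨List.pairwise_replicate.2 (by simp), ih hpw.of_cons, ?_⟩
      intro a ha b hb
      have hac : a = c := List.eq_of_mem_replicate ha
      have hbu : b ∈ u := pvExpand_mem n u b hb
      subst hac
      exact le_of_lt (List.rel_of_pairwise_cons hpw hbu)

theorem pvSumCast (f : Char → Nat) : ∀ (l : List Char),
    (l.map (fun x : Char => ((f x : Nat) : Int))).sum = ((l.map f).sum : Int) := by
  intro l; induction l with
  | nil => simp
  | cons a l ih =>
      rw [List.map_cons, List.sum_cons, ih, List.map_cons, List.sum_cons]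
      push_cast; ring

-- characterisation of the sorted string as groups over the sorted distinct characters
theorem pvSorted_eq_expand (l : List Char) :
    PySem.List.sorted l (fun x => x) false
      = pvExpand (fun c => l.count c) (PySem.List.sorted (PySem.Set.ofList l) (fun x => x) false) := by
  set u := PySem.List.sorted (PySem.Set.ofList l) (fun x => x) false with hu
  have hpw : u.Pairwise (· < ·) := PySem.List.sorted_ofList_pairwise_lt l
  have hnd : u.Nodup := hpw.nodup
  have hmem : ∀ x, x ∈ u ↔ x ∈ l := by
    intro x
    rw [hu, PySem.List.mem_sorted, PySem.Set.mem_ofList]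
  have hperm : (pvExpand (fun c => l.count c) u).Perm l := by
    rw [List.perm_iff_count]
    intro x
    rw [pvExpand_count _ x u hnd]
    by_cases hx : x ∈ l
    · simp [(hmem x).2 hx]
    · simp only [List.count_eq_zero_of_not_mem hx, if_neg (fun h => hx ((hmem x).1 h))]
  exact PySem.List.sorted_id_eq_of_perm_of_pairwise l (pvExpand (fun c => l.count c) u) hperm (pvExpand_pairwise (fun c => l.count c) u hpw)

theorem pvBucketA_finish (string : String) :
    bucket_range string
      = (pvFinish ((PySem.List.enumerate (PySem.List.sorted string.toList (fun x => x) false) 0).foldl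
            pvStepA (PySem.Dict.empty, 0, none))
          (((PySem.List.sorted string.toList (fun x => x) false).length : Int) - 1)).items := by
  unfold bucket_range pvFinish
  cases hst : ((PySem.List.enumerate (PySem.List.sorted string.toList (fun x => x) false) 0).foldl
      pvStepA (PySem.Dict.empty, 0, none)).2.2 <;> · simp [hst]

-- ===== VERDICT (by name: the statement is the Claim_ definition above) =====
theorem bucket_range_spec : Claim_equal_bucket_range := by
  unfold Claim_equal_bucket_range Spec_bucket_range
  intro string _
  have hcnt : pvCounts string.toList = PySem.Dict.counter string.toList :=
    PySem.Dict.foldl_insert_getD_add_one_eq_counter string.toList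
  set l := string.toList with hl
  have hkeys : (PySem.Dict.counter l).keys = PySem.Set.ofList l := PySem.Dict.keys_counter l
  have hgetD : ∀ c, (PySem.Dict.counter l).getD c 0 = (l.count c : Int) :=
    fun c => PySem.Dict.getD_counter l c
  set u := PySem.List.sorted (PySem.Set.ofList l) (fun x => x) false with hu
  have hpw : u.Pairwise (· < ·) := PySem.List.sorted_ofList_pairwise_lt l
  have hmem : ∀ x, x ∈ u ↔ x ∈ l := by
    intro x; rw [hu, PySem.List.mem_sorted, PySem.Set.mem_ofList]
  have hB : bucket_range_alt string
      = ((u.foldl (pvStepB (PySem.Dict.counter l)) (PySem.Dict.empty, 0)).1).items := by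
    unfold bucket_range_alt
    rw [← hl, hcnt, hkeys, ← hu]
  cases hue : u with
  | nil =>
      -- empty string: both sides are the empty dict
      have hlnil : l = [] := by
        by_contra hne
        obtain ⟨x, hx⟩ := List.exists_mem_of_ne_nil l hne
        have := (hmem x).2 hx
        rw [hue] at this
        simp at this
      rw [hB, hue, pvBucketA_finish, ← hl, hlnil]
      simp [PySem.List.sorted, PySem.List.enumerate_nil, pvFinish]
  | cons c0 u' =>
      set n : Char → Nat := fun c => l.count c with hn
      have hpos : ∀ c ∈ u, 0 < n c := fun c hc => List.count_pos_iff.2 ((hmem c).1 hc)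
      have hs : PySem.List.sorted l (fun x => x) false = pvExpand n u := pvSorted_eq_expand l
      -- A side
      rw [pvBucketA_finish, ← hl, hs, hue]
      set last : Int := ((pvExpand n (c0 :: u')).length : Int) - 1 with hlast
      rw [show pvExpand n (c0 :: u') = List.replicate (n c0) c0 ++ pvExpand n u' from rfl]
      obtain ⟨m, hm⟩ := Nat.exists_eq_add_of_lt (hpos c0 (by rw [hue]; simp))
      have hm' : n c0 = m + 1 := by omega
      rw [PySem.List.enumerate_append, List.foldl_append, hm',
        pvRunA_group c0 m 0 PySem.Dict.empty 0 none (by simp),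
        show pvApplyPrev none PySem.Dict.empty 0 0 = PySem.Dict.empty from rfl]
      have hlen0 : ((0 : Int) + ((List.replicate (m + 1) c0).length : Int)) = (n c0 : Int) := by
        simp [hm']
      rw [hlen0]
      have hpw' : u'.Pairwise (· < ·) := by
        have := hpw; rw [hue] at this; exact this.of_cons
      have hpos' : ∀ c ∈ u', 0 < n c := fun c hc => hpos c (by rw [hue]; simp [hc])
      have hne0 : ∀ c ∈ u', c0 ≠ c := by
        intro c hc
        have := hpw; rw [hue] at this
        exact ne_of_lt (List.rel_of_pairwise_cons this hc)
      rw [pvMain n u' hpw' hpos' c0 hne0 PySem.Dict.empty 0 (n c0 : Int) last]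
      -- B side
      rw [hB, hue, pvFoldB (PySem.Dict.counter l) u' c0 PySem.Dict.empty 0]
      congr 2
      · funext x; rw [hgetD x]
      · rw [hgetD c0]; ring
      · -- last index equality
        have h1 : last = (((c0 :: u').map n).sum : Int) - 1 := by
          rw [hlast, pvExpand_length]
        have h2 : ((c0 :: u').map (fun x => (PySem.Dict.counter l).getD x 0)).sum
            = (((c0 :: u').map n).sum : Int) := by
          have hmc : ((c0 :: u').map (fun x => (PySem.Dict.counter l).getD x 0))
              = ((c0 :: u').map (fun x : Char => ((n x : Nat) : Int))) := by
            apply List.map_congr_left; intro x _; rw [hgetD x]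
          rw [hmc, pvSumCast n]
        rw [h1, h2]
        ring
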